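-- pv_equiv track=rewrite | github.com/luboolu/Programmers | Level2/0_더맵게/solution.py | solution
-- ===== SOURCE A (Python) =====
-- import heapq
--
-- def solution(scoville, K):
--     answer = 0
--     heapq.heapify(scoville)
--     while True:
--         min = heapq.heappop(scoville)
--
--         if min >= K:
--             break
--         elif len(scoville) <= 1 and min < K:
--             answer = -1
--             break
--         else:
--             min_2 = heapq.heappop(scoville)
--             new_food = min + min_2 * 2
--             heapq.heappush(scoville, new_food)
--             answer += 1
--
--     return answer
-- ===== SOURCE B (Python) =====
-- def solution(scoville, K):
--     # Maintains a fully sorted list instead of a heap; mutates scoville in place like the original.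
--     scoville.sort()
--     count = 0
--     while scoville:
--         if scoville[0] >= K:
--             return count
--         if len(scoville) <= 2:
--             return -1
--         a = scoville.pop(0)
--         b = scoville.pop(0)
--         new_food = a + 2 * b
--         i = 0
--         while i < len(scoville) and scoville[i] < new_food:
--             i += 1
--         scoville.insert(i, new_food)
--         count += 1
--     return count
-- ===== Notes on version B (the rewrite author's own statement) =====
-- stated objective: alternative
-- what changed: Replaces the binary heap (heapify/heappop/heappush) with a fully sorted list maintained by popping the two front elements and re-inserting the mix at its ordered position via a linear scan.
import Mathlib
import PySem

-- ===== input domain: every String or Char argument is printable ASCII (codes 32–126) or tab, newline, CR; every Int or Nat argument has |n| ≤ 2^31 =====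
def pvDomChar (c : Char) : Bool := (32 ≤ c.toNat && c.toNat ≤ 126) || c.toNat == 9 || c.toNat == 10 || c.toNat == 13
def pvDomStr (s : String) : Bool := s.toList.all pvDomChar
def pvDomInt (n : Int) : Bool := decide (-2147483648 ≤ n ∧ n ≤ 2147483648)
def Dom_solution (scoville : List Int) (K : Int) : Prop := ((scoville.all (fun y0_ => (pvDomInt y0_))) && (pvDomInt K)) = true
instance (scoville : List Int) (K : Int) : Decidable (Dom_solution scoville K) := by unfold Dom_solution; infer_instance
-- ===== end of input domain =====

-- B replaces A's binary heap with a fully sorted list (pop the two smallest from the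
-- front, re-insert the mix at the position found by counting smaller elements); same
-- return value, and like A it consumes/mutates the argument list in Python (the
-- equivalence proved here is about the return value).

-- ===== PORT A =====
-- A uses CPython's heapq; heapify/heappop/heappush and their helpers _siftdown/_siftup
-- are transliterated below from CPython's pure-Python reference implementation.

-- xs[i] for the in-range accesses heapq performs (all its accesses are in range)
def hget (h : List Int) (i : Nat) : Int := h.getD i 0

-- heapq._siftdown(heap, startpos, pos) main loop, newitem = heap[pos] read at entry
def pySiftdownGo : Nat → List Int → Nat → Nat → Int → List Int
  | 0, h, _, pos, newitem => h.set pos newitem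
  | fuel+1, h, startpos, pos, newitem =>
    if startpos < pos then
      if newitem < hget h ((pos - 1) / 2) then
        pySiftdownGo fuel (h.set pos (hget h ((pos - 1) / 2))) startpos ((pos - 1) / 2) newitem
      else h.set pos newitem
    else h.set pos newitem

def pySiftdown (h : List Int) (startpos pos : Nat) : List Int :=
  pySiftdownGo pos h startpos pos (hget h pos)

-- the childpos selection of heapq._siftup (childpos = 2*pos+1, rightpos = childpos+1,
-- move to rightpos if it exists and not heap[childpos] < heap[rightpos])
def pyChild (h : List Int) (endpos pos : Nat) : Nat :=
  if 2*pos+1+1 < endpos ∧ ¬ hget h (2*pos+1) < hget h (2*pos+1+1) then 2*pos+1+1 else 2*pos+1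

-- heapq._siftup(heap, pos) walk-down loop; returns the array and the final hole position
def pySiftupGo : Nat → List Int → Nat → Nat → List Int × Nat
  | 0, h, _, pos => (h, pos)
  | fuel+1, h, endpos, pos =>
    if 2*pos+1 < endpos then
      pySiftupGo fuel (h.set pos (hget h (pyChild h endpos pos))) endpos (pyChild h endpos pos)
    else (h, pos)

-- heapq._siftup(heap, pos): walk to a leaf, place newitem there, then _siftdown
def pySiftup (h : List Int) (pos : Nat) : List Int :=
  let endpos := h.length
  let newitem := hget h pos
  let r := pySiftupGo (endpos - pos) h endpos pos
  pySiftdown (r.1.set r.2 newitem) pos r.2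

-- heapq.heapify: for i in reversed(range(n//2)): _siftup(heap, i)
def pyHeapify (x : List Int) : List Int :=
  ((List.range (x.length / 2)).reverse).foldl (fun acc i => pySiftup acc i) x

-- heapq.heappop; none = IndexError on an empty heap
def pyHeappop (h : List Int) : Option (Int × List Int) :=
  match h.getLast? with
  | none => none
  | some lastelt =>
    let rest := h.dropLast
    if rest.isEmpty then some (lastelt, rest)
    else some (hget rest 0, pySiftup (rest.set 0 lastelt) 0)

-- heapq.heappush: append then _siftdown(heap, 0, len(heap)-1)
def pyHeappush (h : List Int) (item : Int) : List Int :=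
  let h2 := h ++ [item]
  pySiftdown h2 0 (h2.length - 1)


-- the while-loop of A (the unreachable 'none' arms return the accumulator;
-- Python raises IndexError there, which Pre_solution excludes)
def loopA : Nat → List Int → Int → Int → Int
  | 0, _, answer, _ => answer
  | fuel+1, h, answer, K =>
    match pyHeappop h with
    | none => answer
    | some (mn, h1) =>
      if mn ≥ K then answer
      else if h1.length ≤ 1 ∧ mn < K then -1
      else match pyHeappop h1 with
        | none => answer
        | some (mn2, h2) => loopA fuel (pyHeappush h2 (mn + mn2 * 2)) (answer + 1) K

def solution (scoville : List Int) (K : Int) : Int :=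
  loopA (pyHeapify scoville).length (pyHeapify scoville) 0 K

-- ===== PORT B =====

-- pos = sum(1 for v in scoville if v < new_food)
def insPos (xs : List Int) (x : Int) : Nat :=
  xs.foldl (fun p v => if v < x then p + 1 else p) 0


-- the while-loop of B over the sorted list
def loopB : Nat → List Int → Int → Int → Int
  | 0, _, _, count => count
  | fuel+1, xs, K, count =>
    match xs with
    | [] => count
    | a :: rest =>
      if a ≥ K then count
      else if rest.length ≤ 1 then -1
      else match rest with
        | [] => -1
        | b :: rest2 =>
          let nf := a + 2 * b
          loopB fuel (rest2.insertIdx (insPos rest2 nf) nf) K (count + 1)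

def solution_alt (scoville : List Int) (K : Int) : Int :=
  loopB (PySem.List.sorted scoville (fun v => v) false).length
    (PySem.List.sorted scoville (fun v => v) false) K 0

-- ===== PRECONDITION & SPEC =====
-- Pre_ excludes only the empty list, on which Python A raises IndexError at the first heappop.
def Pre_solution (scoville : List Int) (K : Int) : Prop := scoville ≠ []
instance (scoville : List Int) (K : Int) : Decidable (Pre_solution scoville K) := by
  unfold Pre_solution; infer_instance

def pvWitness_solution : List Int × Int := ([1, 2, 3, 9, 10, 12], 7)

def Spec_solution (scoville : List Int) (K : Int) (out : Int) : Prop := out = solution_alt scoville K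
instance (scoville : List Int) (K : Int) (out : Int) : Decidable (Spec_solution scoville K out) := by
  unfold Spec_solution; infer_instance

-- ===== CLAIM (what is proved, stated in full; the proofs are below) =====
def Claim_equal_solution : Prop := ∀ (scoville : List Int) (K : Int),
  Dom_solution scoville K → Pre_solution scoville K → Spec_solution scoville K (solution scoville K)

-- ===== LEMMAS AND PROOFS =====

theorem length_pySiftdownGo (fuel : Nat) (h : List Int) (st p : Nat) (x : Int) :
    (pySiftdownGo fuel h st p x).length = h.length := by
  fun_induction pySiftdownGo fuel h st p x <;> simp_all

theorem length_pySiftupGo (fuel : Nat) (h : List Int) (e p : Nat) :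
    (pySiftupGo fuel h e p).1.length = h.length := by
  fun_induction pySiftupGo fuel h e p <;> simp_all

theorem length_pySiftup (h : List Int) (p : Nat) :
    (pySiftup h p).length = h.length := by
  simp [pySiftup, pySiftdown, length_pySiftdownGo, length_pySiftupGo]

theorem length_pyHeappush (h : List Int) (x : Int) :
    (pyHeappush h x).length = h.length + 1 := by
  simp [pyHeappush, pySiftdown, length_pySiftdownGo]

theorem length_pyHeappop {h : List Int} {m : Int} {h' : List Int}
    (hp : pyHeappop h = some (m, h')) : h'.length + 1 = h.length := by
  unfold pyHeappop at hp
  cases hl : h.getLast? with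
  | none => rw [hl] at hp; exact absurd hp (by simp)
  | some lastelt =>
    rw [hl] at hp
    have hne : h ≠ [] := by intro he; rw [he] at hl; simp at hl
    have hlen : 0 < h.length := List.length_pos_iff.mpr hne
    simp only at hp
    split at hp
    · simp only [Option.some.injEq, Prod.mk.injEq] at hp
      obtain ⟨rfl, rfl⟩ := hp
      have hd : h.dropLast.length = h.length - 1 := by simp
      omega
    · simp only [Option.some.injEq, Prod.mk.injEq] at hp
      obtain ⟨rfl, rfl⟩ := hp
      have hset : (h.dropLast.set 0 lastelt).length = h.length - 1 := by simp
      rw [length_pySiftup, hset]; omega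

theorem foldl_count (x : Int) : ∀ (xs : List Int) (a : Nat),
    xs.foldl (fun p v => if v < x then p + 1 else p) a
      = a + xs.countP (fun v => decide (v < x)) := by
  intro xs; induction xs with
  | nil => simp
  | cons v t ih => intro a; simp only [List.foldl_cons, List.countP_cons, ih]; split <;> simp_all <;> omega

theorem insPos_le (xs : List Int) (x : Int) : insPos xs x ≤ xs.length := by
  rw [insPos, foldl_count]; simpa using List.countP_le_length


def childOf (p c : Nat) : Prop := c = 2*p+1 ∨ c = 2*p+2

-- j lies in the subtree rooted at rt (of the implicit binary tree on indices)
def desc (rt j : Nat) : Bool :=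
  if j = rt then true
  else if j ≤ rt then false
  else desc rt ((j-1)/2)
termination_by j
decreasing_by omega

def IsHeap (h : List Int) : Prop :=
  ∀ p c, c < h.length → childOf p c → hget h p ≤ hget h c

theorem hget_eq_getElem (h : List Int) {i : Nat} (hi : i < h.length) : hget h i = h[i] :=
  List.getD_eq_getElem h 0 hi

theorem hget_set_self {h : List Int} {i : Nat} {v : Int} (hi : i < h.length) :
    hget (h.set i v) i = v := by
  simp [hget, List.getD_eq_getElem?_getD, hi]

theorem hget_set_ne {h : List Int} {i : Nat} {v : Int} {j : Nat} (hij : j ≠ i) :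
    hget (h.set i v) j = hget h j := by
  simp [hget, List.getD_eq_getElem?_getD, List.getElem?_set_ne (Ne.symm hij)]

theorem set_hget_self {h : List Int} {i : Nat} (hi : i < h.length) :
    h.set i (hget h i) = h := by
  rw [hget_eq_getElem h hi]; exact List.set_getElem_self hi

theorem hget_dropLast {h : List Int} {j : Nat} (hj : j + 1 < h.length) :
    hget h.dropLast j = hget h j := by
  have h1 : j < h.dropLast.length := by simp; omega
  rw [hget_eq_getElem _ h1, hget_eq_getElem h (by omega), List.getElem_dropLast]

theorem hget_append_left {h t : List Int} {j : Nat} (hj : j < h.length) :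
    hget (h ++ t) j = hget h j := by
  simp [hget, List.getD_eq_getElem?_getD, List.getElem?_append_left hj]

theorem desc_self (rt : Nat) : desc rt rt = true := by unfold desc; simp

theorem desc_le {rt j : Nat} (hd : desc rt j = true) : rt ≤ j := by
  fun_induction desc rt j with
  | case1 => omega
  | case2 => simp_all
  | case3 j h1 h2 ih => omega

theorem desc_par {rt c : Nat} (hd : desc rt c = true) (hne : c ≠ rt) :
    rt < c ∧ desc rt ((c-1)/2) = true := by
  rw [desc] at hd
  split_ifs at hd with h1 h2
  · exact absurd h1 hne
  · exact ⟨by omega, hd⟩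

theorem desc_child {rt p c : Nat} (hd : desc rt p = true) (hc : childOf p c) :
    desc rt c = true := by
  have hrp := desc_le hd
  have hpc : (c-1)/2 = p ∧ rt < c := by rcases hc with h | h <;> omega
  rw [desc]
  split_ifs with h1 h2
  · rfl
  · omega
  · rw [hpc.1]; exact hd

theorem desc_zero : ∀ j, desc 0 j = true := by
  intro j
  induction j using Nat.strong_induction_on with
  | _ j ih =>
    rw [desc]
    split_ifs with h1 h2
    · rfl
    · omega
    · exact ih _ (by omega)

theorem ms_set : ∀ (l : List Int) (i : Nat), i < l.length → ∀ v : Int,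
    (hget l i) ::ₘ (↑(l.set i v) : Multiset Int) = v ::ₘ (↑l : Multiset Int) := by
  intro l
  induction l with
  | nil => simp
  | cons a t ih =>
    intro i hi v
    cases i with
    | zero => simp [hget, ← Multiset.cons_coe, Multiset.cons_swap]
    | succ i =>
      have hi' : i < t.length := by simp at hi; omega
      have ih' := ih i hi' v
      simp only [hget] at ih'
      simp only [hget, List.getD_cons_succ, List.set_cons_succ, ← Multiset.cons_coe]
      rw [Multiset.cons_swap, ih', Multiset.cons_swap]

theorem ms_swap {h : List Int} {p q : Nat} (hp : p < h.length) (hq : q < h.length)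
    (hne : p ≠ q) (x : Int) :
    (↑((h.set p (hget h q)).set q x) : Multiset Int) = ↑(h.set p x) := by
  have hq' : q < (h.set p (hget h q)).length := by simpa using hq
  have hA : hget (h.set p (hget h q)) q = hget h q := hget_set_ne (Ne.symm hne)
  have e1 := ms_set (h.set p (hget h q)) q hq' x
  rw [hA] at e1
  have e2 := ms_set h p hp (hget h q)
  have e3 := ms_set h p hp x
  have key : hget h p ::ₘ hget h q ::ₘ (↑((h.set p (hget h q)).set q x) : Multiset Int)
      = hget h p ::ₘ hget h q ::ₘ (↑(h.set p x) : Multiset Int) := by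
    calc hget h p ::ₘ hget h q ::ₘ (↑((h.set p (hget h q)).set q x) : Multiset Int)
        = hget h p ::ₘ (x ::ₘ ↑(h.set p (hget h q))) := by rw [e1]
      _ = x ::ₘ (hget h p ::ₘ ↑(h.set p (hget h q))) := Multiset.cons_swap _ _ _
      _ = x ::ₘ (hget h q ::ₘ ↑h) := by rw [e2]
      _ = hget h q ::ₘ (x ::ₘ ↑h) := Multiset.cons_swap _ _ _
      _ = hget h q ::ₘ (hget h p ::ₘ ↑(h.set p x)) := by rw [e3]
      _ = hget h p ::ₘ hget h q ::ₘ ↑(h.set p x) := Multiset.cons_swap _ _ _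
  exact (Multiset.cons_inj_right _).mp ((Multiset.cons_inj_right _).mp key)

theorem siftdownGo_spec (fuel : Nat) (h : List Int) (rt pos : Nat) (x : Int) :
    pos ≤ fuel → pos < h.length → desc rt pos = true →
    (∀ p c, c < h.length → childOf p c → desc rt p = true → p ≠ pos → c ≠ pos → hget h p ≤ hget h c) →
    (∀ c, c < h.length → childOf pos c → x ≤ hget h c) →
    (∀ c, c < h.length → childOf pos c → rt < pos → hget h ((pos-1)/2) ≤ hget h c) →
    (pySiftdownGo fuel h rt pos x).length = h.length ∧
    (∀ j, desc rt j = false → hget (pySiftdownGo fuel h rt pos x) j = hget h j) ∧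
    ((↑(pySiftdownGo fuel h rt pos x) : Multiset Int) = ↑(h.set pos x)) ∧
    (∀ p c, c < h.length → childOf p c → desc rt p = true →
      hget (pySiftdownGo fuel h rt pos x) p ≤ hget (pySiftdownGo fuel h rt pos x) c) := by
  fun_induction pySiftdownGo fuel h rt pos x with
  | case1 h rt pos x =>
    intro hfuel hpos hdesc Hord Hbelow Hbridge
    have hpos0 : pos = 0 := by omega
    refine ⟨by simp, ?_, rfl, ?_⟩
    · intro j hj
      have hjp : j ≠ pos := by intro he; rw [he, hdesc] at hj; cases hj
      rw [hget_set_ne hjp]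
    · intro p c hc hch hdp
      by_cases hpe : p = pos
      · subst hpe
        have hcne : c ≠ p := by rcases hch with h' | h' <;> omega
        rw [hget_set_self hpos, hget_set_ne hcne]
        exact Hbelow c hc hch
      · by_cases hce : c = pos
        · exfalso; rcases hch with h' | h' <;> omega
        · rw [hget_set_ne hpe, hget_set_ne hce]
          exact Hord p c hc hch hdp hpe hce
  | case2 fuel h rt pos x h1 hlt ih =>
    intro hfuel hpos hdesc Hord Hbelow Hbridge
    set pp := (pos - 1) / 2 with hpp
    have hppos : pp < pos := by omega
    have hpplt : pp < h.length := lt_trans hppos hpos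
    have hdpp : desc rt pp = true := (desc_par hdesc (by omega)).2
    have hlen : (h.set pos (hget h pp)).length = h.length := by simp
    have Hord' : ∀ p c, c < (h.set pos (hget h pp)).length → childOf p c → desc rt p = true →
        p ≠ pp → c ≠ pp → hget (h.set pos (hget h pp)) p ≤ hget (h.set pos (hget h pp)) c := by
      intro p c hc hch hdp hppne hcne
      rw [hlen] at hc
      by_cases hpe : p = pos
      · subst hpe
        have hcpos : c ≠ p := by rcases hch with h' | h' <;> omega
        rw [hget_set_self hpos, hget_set_ne hcpos]
        exact Hbridge c hc hch h1
      · by_cases hce : c = pos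
        · exfalso; rcases hch with h' | h' <;> omega
        · rw [hget_set_ne hpe, hget_set_ne hce]
          exact Hord p c hc hch hdp hpe hce
    have Hbelow' : ∀ c, c < (h.set pos (hget h pp)).length → childOf pp c →
        x ≤ hget (h.set pos (hget h pp)) c := by
      intro c hc hch
      rw [hlen] at hc
      by_cases hce : c = pos
      · subst hce; rw [hget_set_self hpos]; exact le_of_lt hlt
      · rw [hget_set_ne hce]
        exact le_trans (le_of_lt hlt) (Hord pp c hc hch hdpp (by omega) hce)
    have Hbridge' : ∀ c, c < (h.set pos (hget h pp)).length → childOf pp c → rt < pp →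
        hget (h.set pos (hget h pp)) ((pp-1)/2) ≤ hget (h.set pos (hget h pp)) c := by
      intro c hc hch hrt
      rw [hlen] at hc
      have hg : (pp-1)/2 ≠ pos := by omega
      have hdg : desc rt ((pp-1)/2) = true := (desc_par hdpp (by omega)).2
      have hgch : childOf ((pp-1)/2) pp := by unfold childOf; omega
      rw [hget_set_ne hg]
      by_cases hce : c = pos
      · subst hce; rw [hget_set_self hpos]
        exact Hord ((pp-1)/2) pp hpplt hgch hdg hg (by omega)
      · rw [hget_set_ne hce]
        exact le_trans (Hord ((pp-1)/2) pp hpplt hgch hdg hg (by omega))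
          (Hord pp c hc hch hdpp (by omega) hce)
    obtain ⟨L, Loc, Ms, Pr⟩ := ih (by omega) (by rw [hlen]; exact hpplt) hdpp Hord' Hbelow' Hbridge'
    refine ⟨by rw [L, hlen], ?_, ?_, ?_⟩
    · intro j hj
      have hjp : j ≠ pos := by intro he; rw [he, hdesc] at hj; cases hj
      rw [Loc j hj, hget_set_ne hjp]
    · rw [Ms]; exact ms_swap hpos hpplt (by omega) x
    · intro p c hc hch hdp
      exact Pr p c (by rw [hlen]; exact hc) hch hdp
  | case3 fuel h rt pos x h1 hge =>
    intro _ hpos hdesc Hord Hbelow Hbridge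
    refine ⟨by simp, ?_, rfl, ?_⟩
    · intro j hj
      have hjp : j ≠ pos := by intro he; rw [he, hdesc] at hj; cases hj
      rw [hget_set_ne hjp]
    · intro p c hc hch hdp
      by_cases hpe : p = pos
      · subst hpe
        have hcne : c ≠ p := by rcases hch with h' | h' <;> omega
        rw [hget_set_self hpos, hget_set_ne hcne]
        exact Hbelow c hc hch
      · by_cases hce : c = pos
        · subst hce
          have hpe2 : p = (c-1)/2 := by rcases hch with h' | h' <;> omega
          rw [hget_set_ne hpe, hget_set_self hpos, hpe2]
          exact not_lt.mp hge
        · rw [hget_set_ne hpe, hget_set_ne hce]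
          exact Hord p c hc hch hdp hpe hce
  | case4 fuel h rt pos x h1 =>
    intro _ hpos hdesc Hord Hbelow Hbridge
    refine ⟨by simp, ?_, rfl, ?_⟩
    · intro j hj
      have hjp : j ≠ pos := by intro he; rw [he, hdesc] at hj; cases hj
      rw [hget_set_ne hjp]
    · intro p c hc hch hdp
      by_cases hpe : p = pos
      · subst hpe
        have hcne : c ≠ p := by rcases hch with h' | h' <;> omega
        rw [hget_set_self hpos, hget_set_ne hcne]
        exact Hbelow c hc hch
      · by_cases hce : c = pos
        · exfalso
          have hle := desc_le hdesc
          have hle2 := desc_le hdp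
          rcases hch with h' | h' <;> omega
        · rw [hget_set_ne hpe, hget_set_ne hce]
          exact Hord p c hc hch hdp hpe hce

theorem siftupGo_spec (fuel : Nat) (h : List Int) (e pos rt : Nat) :
    e - pos ≤ fuel → e = h.length → pos < e → desc rt pos = true →
    (∀ p c, c < e → childOf p c → desc rt p = true → p ≠ pos → hget h p ≤ hget h c) →
    (∀ c, c < e → childOf pos c → rt < pos → hget h ((pos-1)/2) ≤ hget h c) →
    (pySiftupGo fuel h e pos).1.length = h.length ∧
    (∀ j, desc rt j = false → hget (pySiftupGo fuel h e pos).1 j = hget h j) ∧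
    (∀ x : Int, (↑((pySiftupGo fuel h e pos).1.set (pySiftupGo fuel h e pos).2 x) : Multiset Int) = ↑(h.set pos x)) ∧
    (∀ p c, c < e → childOf p c → desc rt p = true → p ≠ (pySiftupGo fuel h e pos).2 →
      hget (pySiftupGo fuel h e pos).1 p ≤ hget (pySiftupGo fuel h e pos).1 c) ∧
    (pySiftupGo fuel h e pos).2 < e ∧ desc rt (pySiftupGo fuel h e pos).2 = true ∧
    ¬ (2*(pySiftupGo fuel h e pos).2+1 < e) := by
  fun_induction pySiftupGo fuel h e pos with
  | case1 h e pos =>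
    intro hfuel he hpos hdesc Hord Hbridge
    exact absurd hfuel (by omega)
  | case2 fuel h e pos h1 ih =>
    intro hfuel he hpos hdesc Hord Hbridge
    set cp := pyChild h e pos with hcpdef
    have hcpor : cp = 2*pos+1+1 ∨ cp = 2*pos+1 := by
      rw [hcpdef, pyChild]; split <;> simp
    have hchild : childOf pos cp := by unfold childOf; omega
    have hcplt : cp < e := by
      rw [hcpdef, pyChild]; split <;> omega
    have hposcp : pos < cp := by omega
    have hmin : ∀ s, s < e → childOf pos s → hget h cp ≤ hget h s := by
      intro s hs hsch
      rw [hcpdef, pyChild]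
      rcases hsch with rfl | rfl
      · split
        · rename_i hcond; exact not_lt.mp hcond.2
        · exact le_refl _
      · split
        · exact le_refl _
        · rename_i hcond
          rw [not_and_or, not_not] at hcond
          rcases hcond with hbad | hlt
          · exact absurd (by omega : 2*pos+1+1 < e) hbad
          · exact le_of_lt hlt
    have hdcp : desc rt cp = true := desc_child hdesc hchild
    have hlen : (h.set pos (hget h cp)).length = h.length := by simp
    have Hord' : ∀ p c, c < e → childOf p c → desc rt p = true → p ≠ cp →
        hget (h.set pos (hget h cp)) p ≤ hget (h.set pos (hget h cp)) c := by
      intro p c hc hch hdp hpcp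
      by_cases hpe : p = pos
      · subst hpe
        have hcne : c ≠ p := by rcases hch with h' | h' <;> omega
        rw [hget_set_self (he ▸ hpos), hget_set_ne hcne]
        exact hmin c hc hch
      · by_cases hce : c = pos
        · subst hce
          have hpar : p = (c-1)/2 := by rcases hch with h' | h' <;> omega
          have hcrt : c ≠ rt := by
            intro hrt0
            have := desc_le hdp
            rcases hch with h' | h' <;> omega
          rw [hget_set_ne hpe, hget_set_self (he ▸ hpos)]
          have hrtc : rt < c := (desc_par hdesc hcrt).1
          exact hpar ▸ Hbridge cp hcplt hchild hrtc
        · rw [hget_set_ne hpe, hget_set_ne hce]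
          exact Hord p c hc hch hdp hpe
    have Hbridge' : ∀ c, c < e → childOf cp c → rt < cp →
        hget (h.set pos (hget h cp)) ((cp-1)/2) ≤ hget (h.set pos (hget h cp)) c := by
      intro c hc hch _
      have hpar : (cp-1)/2 = pos := by rcases hchild with h' | h' <;> omega
      have hcne : c ≠ pos := by rcases hch with h' | h' <;> omega
      rw [hpar, hget_set_self (he ▸ hpos), hget_set_ne hcne]
      exact Hord cp c hc hch hdcp (by omega)
    obtain ⟨L, Loc, Ms, Pr, hr2, hr2d, hr2leaf⟩ :=
      ih (by omega) (by rw [hlen]; exact he) hcplt hdcp Hord' Hbridge'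
    refine ⟨by rw [L, hlen], ?_, ?_, Pr, hr2, hr2d, hr2leaf⟩
    · intro j hj
      have hjp : j ≠ pos := by intro hjq; rw [hjq, hdesc] at hj; cases hj
      rw [Loc j hj, hget_set_ne hjp]
    · intro y
      rw [Ms y]
      exact ms_swap (he ▸ hpos) (he ▸ hcplt) (by omega) y
  | case3 fuel h e pos h1 =>
    intro _ he hpos hdesc Hord Hbridge
    exact ⟨rfl, fun j _ => rfl, fun y => rfl,
      fun p c hc hch hdp hpne => Hord p c hc hch hdp hpne, hpos, hdesc, h1⟩

theorem siftup_spec (h : List Int) (rt : Nat) (hrt : rt < h.length)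
    (Hord : ∀ p c, c < h.length → childOf p c → desc rt p = true → p ≠ rt → hget h p ≤ hget h c) :
    (pySiftup h rt).length = h.length ∧
    (∀ j, desc rt j = false → hget (pySiftup h rt) j = hget h j) ∧
    ((↑(pySiftup h rt) : Multiset Int) = ↑h) ∧
    (∀ p c, c < h.length → childOf p c → desc rt p = true →
      hget (pySiftup h rt) p ≤ hget (pySiftup h rt) c) := by
  obtain ⟨L1, Loc1, Ms1, Pr1, hr2, hr2d, hleaf⟩ :=
    siftupGo_spec (h.length - rt) h h.length rt rt le_rfl rfl hrt (desc_self rt)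
      (fun p c hc hch hdp hpne => Hord p c hc hch hdp hpne)
      (fun c hc hch hlt => absurd hlt (lt_irrefl rt))
  set r := pySiftupGo (h.length - rt) h h.length rt with hrdef
  have hr2' : r.2 < r.1.length := by rw [L1]; exact hr2
  have hrw : pySiftup h rt = pySiftdownGo r.2 (r.1.set r.2 (hget h rt)) rt r.2
      (hget (r.1.set r.2 (hget h rt)) r.2) := rfl
  rw [hget_set_self hr2'] at hrw
  set h2 := r.1.set r.2 (hget h rt) with hh2
  have h2len : h2.length = h.length := by rw [hh2]; simp [L1]
  have hpos2 : r.2 < h2.length := by rw [h2len]; exact hr2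
  have Hord2 : ∀ p c, c < h2.length → childOf p c → desc rt p = true → p ≠ r.2 → c ≠ r.2 →
      hget h2 p ≤ hget h2 c := by
    intro p c hc hch hdp hpne hcne
    rw [hh2, hget_set_ne hpne, hget_set_ne hcne]
    exact Pr1 p c (by rw [h2len] at hc; exact hc) hch hdp hpne
  have Hbelow2 : ∀ c, c < h2.length → childOf r.2 c → hget h rt ≤ hget h2 c := by
    intro c hc hch; exfalso; rw [h2len] at hc; rcases hch with h' | h' <;> omega
  have Hbridge2 : ∀ c, c < h2.length → childOf r.2 c → rt < r.2 →
      hget h2 ((r.2-1)/2) ≤ hget h2 c := by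
    intro c hc hch _; exfalso; rw [h2len] at hc; rcases hch with h' | h' <;> omega
  obtain ⟨L2, Loc2, Ms2, Pr2⟩ := siftdownGo_spec r.2 h2 rt r.2 (hget h rt) le_rfl hpos2 hr2d Hord2 Hbelow2 Hbridge2
  refine ⟨?_, ?_, ?_, ?_⟩
  · rw [hrw, L2, h2len]
  · intro j hj
    have hjne : j ≠ r.2 := by intro hq; rw [hq, hr2d] at hj; cases hj
    rw [hrw, Loc2 j hj, hh2, hget_set_ne hjne, Loc1 j hj]
  · rw [hrw, Ms2, hh2, List.set_set, Ms1 (hget h rt), set_hget_self hrt]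
  · intro p c hc hch hdp
    rw [hrw]
    exact Pr2 p c (by rw [h2len]; exact hc) hch hdp

theorem heapify_go : ∀ (k : Nat) (h : List Int), k ≤ h.length →
    (∀ p c, c < h.length → childOf p c → k ≤ p → hget h p ≤ hget h c) →
    (((List.range k).reverse.foldl (fun acc i => pySiftup acc i) h).length = h.length ∧
     ((↑((List.range k).reverse.foldl (fun acc i => pySiftup acc i) h) : Multiset Int) = ↑h) ∧
     IsHeap ((List.range k).reverse.foldl (fun acc i => pySiftup acc i) h)) := by
  intro k
  induction k with
  | zero =>
    intro h _ H
    refine ⟨by simp, by simp, ?_⟩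
    simp only [List.range_zero, List.reverse_nil, List.foldl_nil]
    exact fun p c hc hch => H p c hc hch (Nat.zero_le p)
  | succ k ih =>
    intro h hk H
    have hstep : (List.range (k+1)).reverse = k :: (List.range k).reverse := by
      simp [List.range_succ]
    rw [hstep, List.foldl_cons]
    have hklen : k < h.length := by omega
    obtain ⟨L, Loc, Ms, Pr⟩ := siftup_spec h k hklen
      (fun p c hc hch hdp hpne => H p c hc hch (by have := desc_le hdp; omega))
    have Hnew : ∀ p c, c < (pySiftup h k).length → childOf p c → k ≤ p →
        hget (pySiftup h k) p ≤ hget (pySiftup h k) c := by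
      intro p c hc hch hkp
      rw [L] at hc
      by_cases hdp : desc k p = true
      · exact Pr p c hc hch hdp
      · have hpd : desc k p = false := by simpa using hdp
        have hcd : desc k c = false := by
          by_contra hcd'
          have hcd2 : desc k c = true := by simpa using hcd'
          have hcne : c ≠ k := by rcases hch with h' | h' <;> omega
          have hpar := (desc_par hcd2 hcne).2
          have hpeq : (c-1)/2 = p := by rcases hch with h' | h' <;> omega
          rw [hpeq] at hpar
          exact absurd hpar (by simp [hpd])
        rw [Loc p hpd, Loc c hcd]
        have hpk : p ≠ k := by intro hq; rw [hq, desc_self] at hpd; cases hpd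
        exact H p c hc hch (by omega)
    obtain ⟨L2, Ms2, Hh⟩ := ih (pySiftup h k) (by rw [L]; omega) Hnew
    exact ⟨L2.trans L, Ms2.trans Ms, Hh⟩

theorem heapify_spec (x : List Int) :
    (pyHeapify x).length = x.length ∧ ((↑(pyHeapify x) : Multiset Int) = ↑x) ∧ IsHeap (pyHeapify x) := by
  unfold pyHeapify
  exact heapify_go (x.length / 2) x (by omega)
    (fun p c hc hch hp => by exfalso; rcases hch with h' | h' <;> omega)

theorem isHeap_min {h : List Int} (hh : IsHeap h) : ∀ j, j < h.length → hget h 0 ≤ hget h j := by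
  intro j
  induction j using Nat.strong_induction_on with
  | _ j ih =>
    intro hj
    match j with
    | 0 => exact le_refl _
    | j+1 =>
      have hc : childOf (j/2) (j+1) := by unfold childOf; omega
      have h1 : hget h (j/2) ≤ hget h (j+1) := hh (j/2) (j+1) hj hc
      exact le_trans (ih (j/2) (by omega) (by omega)) h1

theorem isHeap_min_mem {h : List Int} (hh : IsHeap h) : ∀ y ∈ h, hget h 0 ≤ y := by
  intro y hy
  obtain ⟨j, hj, rfl⟩ := List.mem_iff_getElem.mp hy
  rw [← hget_eq_getElem h hj]
  exact isHeap_min hh j hj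

theorem heappop_spec {h : List Int} (hh : IsHeap h) (hne : h ≠ []) :
    ∃ m h', pyHeappop h = some (m, h') ∧ IsHeap h' ∧
      ((↑h : Multiset Int) = m ::ₘ ↑h') ∧ (∀ y ∈ h, m ≤ y) := by
  have hlast : h.getLast? = some (h.getLast hne) := List.getLast?_eq_some_getLast hne
  have hsplit : h.dropLast ++ [h.getLast hne] = h := List.dropLast_append_getLast hne
  have hcoe : (↑h : Multiset Int) = (h.getLast hne) ::ₘ ↑h.dropLast := by
    conv_lhs => rw [← hsplit]
    rw [Multiset.cons_coe, Multiset.coe_eq_coe]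
    exact List.perm_append_singleton _ _
  by_cases hre : h.dropLast.isEmpty
  · have hdl : h.dropLast = [] := by simpa [List.isEmpty_iff] using hre
    have hpop : pyHeappop h = some (h.getLast hne, h.dropLast) := by
      simp only [pyHeappop, hlast, hre, if_true]
    refine ⟨h.getLast hne, h.dropLast, hpop, ?_, ?_, ?_⟩
    · intro p c hc hch; rw [hdl] at hc; simp at hc
    · rw [hcoe]
    · intro y hy
      rw [show h = h.dropLast ++ [h.getLast hne] from hsplit.symm, hdl] at hy
      simp at hy
      rw [hy]
  · have hrne : h.dropLast ≠ [] := by simpa [List.isEmpty_iff] using hre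
    have hrlen : h.dropLast.length = h.length - 1 := by simp
    have hrpos : 0 < h.dropLast.length := List.length_pos_iff.mpr hrne
    have hlen2 : 2 ≤ h.length := by omega
    have hpop : pyHeappop h =
        some (hget h.dropLast 0, pySiftup (h.dropLast.set 0 (h.getLast hne)) 0) := by
      simp [pyHeappop, hlast, hre]
    have h0len : (h.dropLast.set 0 (h.getLast hne)).length = h.dropLast.length := by simp
    have Hord0 : ∀ p c, c < (h.dropLast.set 0 (h.getLast hne)).length → childOf p c →
        desc 0 p = true → p ≠ 0 →
        hget (h.dropLast.set 0 (h.getLast hne)) p ≤ hget (h.dropLast.set 0 (h.getLast hne)) c := by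
      intro p c hc hch _ hp0
      rw [h0len, hrlen] at hc
      have hpc : p < c := by rcases hch with h' | h' <;> omega
      have hc0 : c ≠ 0 := by omega
      rw [hget_set_ne hp0, hget_set_ne hc0,
        hget_dropLast (by omega), hget_dropLast (by omega)]
      exact hh p c (by omega) hch
    obtain ⟨L, Loc, Ms, Pr⟩ := siftup_spec (h.dropLast.set 0 (h.getLast hne)) 0
      (by rw [h0len]; exact hrpos) Hord0
    refine ⟨hget h.dropLast 0, pySiftup (h.dropLast.set 0 (h.getLast hne)) 0, hpop, ?_, ?_, ?_⟩
    · intro p c hc hch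
      exact Pr p c (by rw [L] at hc; exact hc) hch (desc_zero p)
    · have e2 := ms_set h.dropLast 0 hrpos (h.getLast hne)
      rw [Ms, hcoe, ← e2]
    · intro y hy
      rw [hget_dropLast (by omega)]
      exact isHeap_min_mem hh y hy

theorem heappush_spec {h : List Int} (hh : IsHeap h) (x : Int) :
    IsHeap (pyHeappush h x) ∧ ((↑(pyHeappush h x) : Multiset Int) = x ::ₘ ↑h) := by
  have hgx : hget (h ++ [x]) h.length = x := by
    simp [hget, List.getD_eq_getElem?_getD]
  have hrw : pyHeappush h x = pySiftdownGo h.length (h ++ [x]) 0 h.length (hget (h ++ [x]) h.length) := by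
    simp only [pyHeappush, pySiftdown, List.length_append, List.length_cons, List.length_nil,
      Nat.zero_add, Nat.add_sub_cancel]
  rw [hgx] at hrw
  have hpos : h.length < (h ++ [x]).length := by simp
  have Hord : ∀ p c, c < (h ++ [x]).length → childOf p c → desc 0 p = true →
      p ≠ h.length → c ≠ h.length → hget (h ++ [x]) p ≤ hget (h ++ [x]) c := by
    intro p c hc hch _ _ hcne
    simp only [List.length_append, List.length_cons, List.length_nil] at hc
    have hclt : c < h.length := by omega
    have hplt : p < h.length := by rcases hch with h' | h' <;> omega
    rw [hget_append_left hplt, hget_append_left hclt]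
    exact hh p c hclt hch
  have Hbelow : ∀ c, c < (h ++ [x]).length → childOf h.length c → x ≤ hget (h ++ [x]) c := by
    intro c hc hch; exfalso
    simp only [List.length_append, List.length_cons, List.length_nil] at hc
    rcases hch with h' | h' <;> omega
  have Hbridge : ∀ c, c < (h ++ [x]).length → childOf h.length c → 0 < h.length →
      hget (h ++ [x]) ((h.length-1)/2) ≤ hget (h ++ [x]) c := by
    intro c hc hch _; exfalso
    simp only [List.length_append, List.length_cons, List.length_nil] at hc
    rcases hch with h' | h' <;> omega
  obtain ⟨L, _, Ms, Pr⟩ := siftdownGo_spec h.length (h ++ [x]) 0 h.length x le_rfl hpos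
    (desc_zero h.length) Hord Hbelow Hbridge
  constructor
  · intro p c hc hch
    rw [hrw] at hc ⊢
    exact Pr p c (by rw [L] at hc; exact hc) hch (desc_zero p)
  · have hsetid : (h ++ [x]).set h.length x = h ++ [x] := by
      have h2 := List.set_getElem_self (as := h ++ [x]) (i := h.length) (by simp)
      simpa [List.getElem_concat_length] using h2
    rw [hrw, Ms, hsetid, Multiset.cons_coe, Multiset.coe_eq_coe]
    exact List.perm_append_singleton _ _

theorem insPos_eq_countP (xs : List Int) (x : Int) :
    insPos xs x = xs.countP (fun v => decide (v < x)) := by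
  rw [insPos, foldl_count]; simp

theorem ins_pairwise : ∀ (xs : List Int), xs.Pairwise (· ≤ ·) → ∀ x : Int,
    (xs.insertIdx (insPos xs x) x).Pairwise (· ≤ ·) := by
  intro xs hpw x
  rw [insPos_eq_countP]
  induction xs with
  | nil => simp
  | cons a t ih =>
    rw [List.pairwise_cons] at hpw
    by_cases hax : a < x
    · rw [List.countP_cons, if_pos (by simpa using hax), List.insertIdx_succ_cons,
        List.pairwise_cons]
      constructor
      · intro b hb
        rcases List.eq_or_mem_of_mem_insertIdx hb with rfl | hbt
        · exact le_of_lt hax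
        · exact hpw.1 b hbt
      · exact ih hpw.2
    · have hxa : x ≤ a := not_lt.mp hax
      have hc0 : t.countP (fun v => decide (v < x)) = 0 := by
        rw [List.countP_eq_zero]
        intro v hv
        simpa using not_lt.mpr (le_trans hxa (hpw.1 v hv))
      rw [List.countP_cons, if_neg (by simpa using hax), hc0]
      simp only [Nat.add_zero, List.insertIdx_zero]
      rw [List.pairwise_cons]
      refine ⟨?_, List.pairwise_cons.mpr hpw⟩
      intro b hb
      rcases List.mem_cons.mp hb with rfl | hbt
      · exact hxa
      · exact le_trans hxa (hpw.1 b hbt)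

theorem ins_perm (xs : List Int) (x : Int) :
    (xs.insertIdx (insPos xs x) x).Perm (x :: xs) :=
  List.perm_insertIdx x xs (insPos_le xs x)

theorem loopA_none {fuel : Nat} {h : List Int} {ans K : Int} (hp : pyHeappop h = none) :
    loopA (fuel+1) h ans K = ans := by
  rw [loopA, hp]

theorem loopA_break {fuel : Nat} {h : List Int} {ans K mn : Int} {h1 : List Int}
    (hp : pyHeappop h = some (mn, h1)) (hK : mn ≥ K) : loopA (fuel+1) h ans K = ans := by
  rw [loopA, hp]
  simp only [if_pos hK]

theorem loopA_neg1 {fuel : Nat} {h : List Int} {ans K mn : Int} {h1 : List Int}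
    (hp : pyHeappop h = some (mn, h1)) (hK : ¬ mn ≥ K) (hl : h1.length ≤ 1) :
    loopA (fuel+1) h ans K = -1 := by
  rw [loopA, hp]
  simp only [if_neg hK, if_pos (⟨hl, not_le.mp hK⟩ : h1.length ≤ 1 ∧ mn < K)]

theorem loopA_rec {fuel : Nat} {h : List Int} {ans K mn : Int} {h1 : List Int} {mn2 : Int}
    {h2 : List Int} (hp : pyHeappop h = some (mn, h1)) (hK : ¬ mn ≥ K) (hl : ¬ h1.length ≤ 1)
    (hp2 : pyHeappop h1 = some (mn2, h2)) :
    loopA (fuel+1) h ans K = loopA fuel (pyHeappush h2 (mn + mn2 * 2)) (ans + 1) K := by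
  rw [loopA, hp]
  simp only [if_neg hK, if_neg (fun hc => hl hc.1 : ¬ (h1.length ≤ 1 ∧ mn < K))]
  rw [hp2]

theorem loopB_one (fuel : Nat) (a K c : Int) :
    loopB (fuel+1) [a] K c = if a ≥ K then c else -1 := by
  rw [loopB]; simp

theorem loopB_big (fuel : Nat) (a b : Int) (rest2 : List Int) (K c : Int) :
    loopB (fuel+1) (a :: b :: rest2) K c =
      if a ≥ K then c
      else if rest2.length + 1 ≤ 1 then -1
      else loopB fuel (rest2.insertIdx (insPos rest2 (a + 2 * b)) (a + 2 * b)) K (c + 1) := by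
  rw [loopB]; simp

theorem loopB_geK {fuel : Nat} {a : Int} {rest : List Int} {K c : Int} (hK : a ≥ K) :
    loopB (fuel+1) (a :: rest) K c = c := by
  cases rest with
  | nil => rw [loopB_one, if_pos hK]
  | cons b t => rw [loopB_big, if_pos hK]

theorem loopB_small {fuel : Nat} {a : Int} {rest : List Int} {K c : Int} (hK : ¬ a ≥ K)
    (hl : rest.length ≤ 1) : loopB (fuel+1) (a :: rest) K c = -1 := by
  cases rest with
  | nil => rw [loopB_one, if_neg hK]
  | cons b t =>
    rw [loopB_big, if_neg hK, if_pos (by simpa using hl)]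

theorem sim : ∀ (fuel : Nat) (h s : List Int) (K ans : Int), h.length ≤ fuel →
    IsHeap h → s.Pairwise (· ≤ ·) → ((↑h : Multiset Int) = ↑s) →
    loopA fuel h ans K = loopB fuel s K ans := by
  intro fuel
  induction fuel with
  | zero => intro h s K ans _ _ _ _; rfl
  | succ fuel ih =>
    intro h s K ans hlen hh hs hms
    cases s with
    | nil =>
      have hh0 : h = [] := (Multiset.coe_eq_coe.mp hms).eq_nil
      subst hh0
      rw [loopA_none rfl]
      rfl
    | cons a rest =>
      have hperm : h.Perm (a :: rest) := Multiset.coe_eq_coe.mp hms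
      have hne : h ≠ [] := by
        intro h0; subst h0
        have := hperm.length_eq; simp at this
      obtain ⟨m, h1, hpop, hh1, hms1, hmin⟩ := heappop_spec hh hne
      have hl1 := length_pyHeappop hpop
      have hlenhs : h.length = rest.length + 1 := by simpa using hperm.length_eq
      have hma : m = a := by
        have hmem : m ∈ h := by
          have : m ∈ (↑h : Multiset Int) := by rw [hms1]; exact Multiset.mem_cons_self _ _
          simpa using this
        have hmem2 : m ∈ a :: rest := hperm.mem_iff.mp hmem
        have hamem : a ∈ h := hperm.mem_iff.mpr (List.mem_cons_self ..)
        rcases List.mem_cons.mp hmem2 with rfl | hmr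
        · rfl
        · exact le_antisymm (hmin a hamem) ((List.pairwise_cons.mp hs).1 m hmr)
      subst hma
      by_cases hK : m ≥ K
      · rw [loopA_break hpop hK, loopB_geK hK]
      · by_cases hlen1 : rest.length ≤ 1
        · rw [loopA_neg1 hpop hK (by omega), loopB_small hK hlen1]
        · cases rest with
          | nil => simp at hlen1
          | cons b rest2 =>
            have h1ne : h1 ≠ [] := by
              intro h0; rw [h0] at hl1; simp at hl1
              simp at hlenhs; omega
            obtain ⟨m2, h2, hpop2, hh2, hms2, hmin2⟩ := heappop_spec hh1 h1ne
            have hmsrest : (↑h1 : Multiset Int) = ↑(b :: rest2) := by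
              refine (Multiset.cons_inj_right m).mp ?_
              rw [← hms1, hms, ← Multiset.cons_coe]
            have hpermr : h1.Perm (b :: rest2) := Multiset.coe_eq_coe.mp hmsrest
            have hm2b : m2 = b := by
              have hmem : m2 ∈ h1 := by
                have : m2 ∈ (↑h1 : Multiset Int) := by rw [hms2]; exact Multiset.mem_cons_self _ _
                simpa using this
              have hmem2 := hpermr.mem_iff.mp hmem
              have hbmem : b ∈ h1 := hpermr.mem_iff.mpr (List.mem_cons_self ..)
              rcases List.mem_cons.mp hmem2 with rfl | hmr
              · rfl
              · exact le_antisymm (hmin2 b hbmem)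
                  ((List.pairwise_cons.mp (List.pairwise_cons.mp hs).2).1 m2 hmr)
            clear hmin2
            rw [hm2b] at hpop2 hms2
            obtain ⟨hh3, hms3⟩ := heappush_spec hh2 (m + b * 2)
            have hms2' : (↑h2 : Multiset Int) = ↑rest2 := by
              refine (Multiset.cons_inj_right b).mp ?_
              rw [← hms2, hmsrest, ← Multiset.cons_coe]
            rw [loopA_rec hpop hK (by omega) hpop2, loopB_big, if_neg hK,
              if_neg (by simpa using hlen1)]
            apply ih
            · have hp1 := length_pyHeappush h2 (m + b * 2)
              have hp2 := length_pyHeappop hpop2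
              omega
            · exact hh3
            · exact ins_pairwise rest2 (List.pairwise_cons.mp (List.pairwise_cons.mp hs).2).2 (m + 2 * b)
            · rw [hms3, hms2',
                show ((↑(rest2.insertIdx (insPos rest2 (m + 2 * b)) (m + 2 * b))) : Multiset Int)
                  = ↑((m + 2 * b) :: rest2) from Multiset.coe_eq_coe.mpr (ins_perm rest2 (m + 2 * b)),
                ← Multiset.cons_coe,
                show m + b * 2 = m + 2 * b from by ring]

-- ===== VERDICT (by name: the statement is the Claim_ definition above) =====
theorem solution_spec : Claim_equal_solution := by
  unfold Claim_equal_solution Spec_solution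
  intro scoville K _dom _pre
  unfold solution solution_alt
  obtain ⟨hl, hm, hh⟩ := heapify_spec scoville
  have hpw : (PySem.List.sorted scoville (fun v => v) false).Pairwise (· ≤ ·) := by
    simpa using PySem.List.sorted_pairwise scoville (fun v => v)
  have hms : (↑(pyHeapify scoville) : Multiset Int) = ↑(PySem.List.sorted scoville (fun v => v) false) := by
    rw [hm]; exact (Multiset.coe_eq_coe.mpr (PySem.List.sorted_perm scoville (fun v => v) false)).symm
  have hlsort : (PySem.List.sorted scoville (fun v => v) false).length = (pyHeapify scoville).length := by
    rw [hl, PySem.List.length_sorted]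
  rw [hlsort]
  exact sim (pyHeapify scoville).length _ _ K 0 le_rfl hh hpw hms
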